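-- pv_equiv track=rewrite | github.com/sl-harris/aoc-2024 | day4/main.py | find_mas_diag_rl
-- ===== SOURCE A (Python) =====
-- def find_mas_diag_rl(input):
--     input_diag_rl = []
--     coord = []
--
--     for c in range(len(input)):
--         diag_line = ""
--
--         for i in range(c + 1):
--             diag_line += input[i][c - i]
--
--         input_diag_rl.append(diag_line)
--         coord.append((0, i))
--
--     for r in range(1, len(input)):
--         diag_line = ""
--
--         for i in range(len(input) - r):
--             diag_line += input[r + i][len(input) - i - 1]
--
--         input_diag_rl.append(diag_line)
--         coord.append((len(input) - i - 1, r + i))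
--
--     mas_coords = find_mas_lr(input_diag_rl, coord)
--
--     # Diag RL Rev
--     input_diag_rl_rev = [line[::-1] for line in input_diag_rl]
--     mas_coords += find_mas_lr(input_diag_rl_rev, coord, is_rev=True)
--
--     return mas_coords
--
-- def find_mas_lr(input, coord, is_rev=False):
--     mas_centre = []
--
--     for line, (start_x, start_y) in zip(input, coord):
--         last_found = -1
--
--         for _ in range(line.count("MAS")):
--             last_found = line.find("MAS", last_found + 1)
--             if not is_rev:
--                 mas_centre.append((start_x + last_found + 1, start_y - last_found - 1))
--             else:
--                 mas_centre.append(
--                     (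
--                         start_x + len(line) - last_found - 2,
--                         start_y - len(line) + last_found + 2,
--                     )
--                 )
--
--     return mas_centre
-- ===== SOURCE B (Python) =====
-- # B: no diagonal-string building and no count/find scanning: build each anti-diagonal's
-- # coordinate list, read cells straight from the grid, and slide a 3-cell window along the
-- # diagonal (forward for the MAS pass, along the reversed diagonal for A's reversed pass).
-- def find_mas_diag_rl(input):
--     n = len(input)
--     diags = []
--     for c in range(n):
--         diags.append([(i, c - i) for i in range(c + 1)])
--     for r in range(1, n):
--         diags.append([(r + i, n - i - 1) for i in range(n - r)])
--     cells = [[(rc, input[rc[0]][rc[1]]) for rc in d] for d in diags]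
--     out = []
--     for d in cells:
--         out += _scan_mas(d)
--     for d in cells:
--         out += _scan_mas(d[::-1])
--     return out
--
-- def _scan_mas(cells):
--     out = []
--     while len(cells) >= 3:
--         if cells[0][1] == "M" and cells[1][1] == "A" and cells[2][1] == "S":
--             out.append(cells[1][0])
--         cells = cells[1:]
--     return out
-- ===== Notes on version B (the rewrite author's own statement) =====
-- stated objective: alternative
-- what changed: B drops A's diagonal-string building and count()/find() scanning: it builds each anti-diagonal's coordinate list, reads cells straight from the grid, and slides a 3-cell window along the diagonal (and along the reversed diagonal for A's reversed pass), emitting the centre coordinate directly.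
import Mathlib
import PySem

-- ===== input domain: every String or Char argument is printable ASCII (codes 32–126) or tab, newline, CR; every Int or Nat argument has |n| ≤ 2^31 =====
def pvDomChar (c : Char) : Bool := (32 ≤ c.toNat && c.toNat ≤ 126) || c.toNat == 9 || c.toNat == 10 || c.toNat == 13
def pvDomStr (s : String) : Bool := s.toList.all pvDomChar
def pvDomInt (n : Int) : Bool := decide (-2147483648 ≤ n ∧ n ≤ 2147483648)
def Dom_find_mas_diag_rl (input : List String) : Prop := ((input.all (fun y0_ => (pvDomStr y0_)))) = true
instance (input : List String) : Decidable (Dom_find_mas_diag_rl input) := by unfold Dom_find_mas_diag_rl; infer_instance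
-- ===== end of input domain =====

-- B finds the same MAS centres without building diagonal strings and without count/find
-- scanning: it slides a 3-cell window directly along each anti-diagonal (and along the
-- reversed diagonal for A's reversed pass); objective: alternative algorithm, similar cost.

-- ===== PORT A =====
-- port of helper find_mas_lr (strings as List Char; is_rev branch kept)
def pvFindMasLr (lines : List (List Char)) (coord : List (Int × Int)) (is_rev : Bool) : List (Int × Int) :=
  (lines.zip coord).foldl (fun acc lc =>
    let line := lc.1
    let sx := lc.2.1
    let sy := lc.2.2
    ((List.range (PySem.Chars.count line ['M','A','S'])).foldl
      (fun (st : List (Int × Int) × Int) _ =>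
        let lf := PySem.Chars.findFrom line ['M','A','S'] (st.2 + 1) none
        if is_rev then
          (st.1 ++ [(sx + (line.length : Int) - lf - 2, sy - (line.length : Int) + lf + 2)], lf)
        else
          (st.1 ++ [(sx + lf + 1, sy - lf - 1)], lf))
      (acc, (-1 : Int))).1) []

def find_mas_diag_rl (input : List String) : List (Int × Int) :=
  let rows := input.map String.toList
  let n := input.length
  let dc1 := (List.range n).foldl (fun (st : List (List Char) × List (Int × Int)) c =>
      let line := (List.range (c+1)).foldl (fun l i => l ++ [(rows.getD i []).getD (c - i) ' ']) []
      -- after the inner loop Python's leftover i equals c; coord.append((0, i))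
      (st.1 ++ [line], st.2 ++ [((0 : Int), (c : Int))])) ([], [])
  -- range(1, len(input)) written as (List.range n).drop 1
  let dc2 := ((List.range n).drop 1).foldl (fun (st : List (List Char) × List (Int × Int)) r =>
      let line := (List.range (n - r)).foldl (fun l i => l ++ [(rows.getD (r + i) []).getD (n - i - 1) ' ']) []
      -- after the inner loop Python's leftover i equals n - r - 1; coord.append((len(input)-i-1, r+i))
      let iLast : Int := (n : Int) - (r : Int) - 1
      (st.1 ++ [line], st.2 ++ [((n : Int) - iLast - 1, (r : Int) + iLast)])) ([], [])
  let input_diag_rl := dc1.1 ++ dc2.1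
  let coord := dc1.2 ++ dc2.2
  let mas := pvFindMasLr input_diag_rl coord false
  -- line[::-1] is List.reverse
  mas ++ pvFindMasLr (input_diag_rl.map List.reverse) coord true

-- ===== PORT B =====
-- port of helper _scan_mas (while len(cells) >= 3 … cells = cells[1:] as structural recursion)
def pvScanMas : List ((Int × Int) × Char) → List (Int × Int)
  | a :: b :: c :: rest =>
      (if a.2 = 'M' ∧ b.2 = 'A' ∧ c.2 = 'S' then [b.1] else []) ++ pvScanMas (b :: c :: rest)
  | _ => []

def find_mas_diag_rl_alt (input : List String) : List (Int × Int) :=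
  let rows := input.map String.toList
  let n := input.length
  let diags : List (List (Nat × Nat)) :=
    (List.range n).map (fun c => (List.range (c+1)).map (fun i => (i, c - i)))
    ++ ((List.range n).drop 1).map (fun r => (List.range (n - r)).map (fun i => (r + i, n - i - 1)))
  let cells : List (List ((Int × Int) × Char)) :=
    diags.map (fun d => d.map (fun rc => (((rc.1 : Int), (rc.2 : Int)), (rows.getD rc.1 []).getD rc.2 ' ')))
  (cells.foldl (fun out d => out ++ pvScanMas d) [])
    ++ (cells.foldl (fun out d => out ++ pvScanMas d.reverse) [])

-- ===== PRECONDITION & SPEC =====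
-- Pre_ excludes exactly the inputs on which Python A raises IndexError: A reads every row
-- out to column len(input)-1, so every row must have at least len(input) characters.
def Pre_find_mas_diag_rl (input : List String) : Prop :=
  ∀ s ∈ input, input.length ≤ s.toList.length
instance (input : List String) : Decidable (Pre_find_mas_diag_rl input) := by
  unfold Pre_find_mas_diag_rl; infer_instance
def pvWitness_find_mas_diag_rl : List String := ["MAS", "SAM", "XMA"]
def Spec_find_mas_diag_rl (input : List String) (out : List (Int × Int)) : Prop := out = find_mas_diag_rl_alt input
instance (input : List String) (out : List (Int × Int)) : Decidable (Spec_find_mas_diag_rl input out) := by unfold Spec_find_mas_diag_rl; infer_instance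

-- ===== CLAIM (what is proved, stated in full; the proofs are below) =====
def Claim_equal_find_mas_diag_rl : Prop := ∀ (input : List String), Dom_find_mas_diag_rl input → Pre_find_mas_diag_rl input → Spec_find_mas_diag_rl input (find_mas_diag_rl input)

-- ===== LEMMAS AND PROOFS =====

def pvPat : List Char := ['M','A','S']
/-- positions at which "MAS" occurs in a char list, ascending -/
def pvOcc (l : List Char) : List Nat :=
  (List.range l.length).filter (fun p => pvPat.isPrefixOf (List.drop p l))
def pvOccFrom (l : List Char) (k : Nat) : List Nat := (pvOcc l).filter (fun p => decide (k ≤ p))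
def pvDflt : (Int × Int) × Char := (((0:Int),(0:Int)), ' ')

theorem pvOcc_cons (x : Char) (t : List Char) :
    pvOcc (x :: t) = (if pvPat.isPrefixOf (x :: t) then [0] else []) ++ (pvOcc t).map (· + 1) := by
  unfold pvOcc
  simp only [List.length_cons, List.range_succ_eq_map, List.filter_cons, List.filter_map,
    List.drop_zero, Function.comp_def, List.drop_succ_cons]
  by_cases h : pvPat.isPrefixOf (x :: t) <;> simp [h]

theorem mem_pvOcc {l : List Char} {p : Nat} : p ∈ pvOcc l ↔ p < l.length ∧ pvPat <+: List.drop p l := by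
  simp [pvOcc, List.mem_filter, List.mem_range, List.isPrefixOf_iff_prefix]

theorem pvOcc_add3 {l : List Char} {p : Nat} (h : p ∈ pvOcc l) : p + 3 ≤ l.length := by
  have h2 := (mem_pvOcc.1 h).2.length_le
  simp [pvPat] at h2
  omega

theorem pvOcc_pairwise (l : List Char) : (pvOcc l).Pairwise (· < ·) :=
  List.Pairwise.sublist List.filter_sublist List.pairwise_lt_range

theorem pvOccFrom_pairwise (l : List Char) (k : Nat) : (pvOccFrom l k).Pairwise (· < ·) :=
  List.Pairwise.sublist List.filter_sublist (pvOcc_pairwise l)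

theorem mem_pvOccFrom {l : List Char} {k p : Nat} : p ∈ pvOccFrom l k ↔ p ∈ pvOcc l ∧ k ≤ p := by
  simp [pvOccFrom, List.mem_filter]

theorem pvOccFrom_zero (l : List Char) : pvOccFrom l 0 = pvOcc l := by
  unfold pvOccFrom
  apply List.filter_eq_self.2
  simp

-- B-side scan characterised by pvOcc
theorem pvScanMas_eq (cs : List ((Int × Int) × Char)) :
    pvScanMas cs = (pvOcc (cs.map Prod.snd)).map (fun p => (cs.getD (p+1) pvDflt).1) := by
  match cs with
  | [] => simp [pvScanMas, pvOcc]
  | [a] => simp [pvScanMas, pvOcc, pvPat]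
  | [a,b] =>
    simp only [pvScanMas, pvOcc, pvPat]
    rw [List.filter_eq_nil_iff.2]
    · simp
    · intro p hp hc
      rw [List.isPrefixOf_iff_prefix] at hc
      have hl := hc.length_le
      simp at hl hp
      omega
  | a :: b :: c :: rest =>
    have IH := pvScanMas_eq (b :: c :: rest)
    simp only [pvScanMas, IH, List.map_cons, pvOcc_cons]
    by_cases h : a.2 = 'M' ∧ b.2 = 'A' ∧ c.2 = 'S'
    · obtain ⟨h1, h2, h3⟩ := h
      simp [pvPat, h1, h2, h3, List.map_map, Function.comp_def]
    · have h' : ¬ ('M' = a.2 ∧ 'A' = b.2 ∧ 'S' = c.2) := fun ⟨x,y,z⟩ => h ⟨x.symm,y.symm,z.symm⟩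
      have hb : (pvPat.isPrefixOf (a.2 :: b.2 :: c.2 :: rest.map Prod.snd)) = false := by
        rw [Bool.eq_false_iff]
        intro hc
        rw [List.isPrefixOf_iff_prefix] at hc
        rcases hc with ⟨s, hs⟩
        simp [pvPat] at hs
        exact h ⟨hs.1.symm, hs.2.1.symm, hs.2.2.1.symm⟩
      simp [h, hb, List.map_map, Function.comp_def]

-- Python's str.count counts exactly the pvOcc positions ("MAS" cannot overlap itself)
theorem pvCountGo_eq : ∀ (fuel : Nat) (l : List Char) (acc : Nat), l.length ≤ fuel →
    PySem.Chars.count.go pvPat fuel l acc = acc + (pvOcc l).length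
  | 0, l, acc, h => by
    have : l = [] := List.eq_nil_of_length_eq_zero (Nat.le_zero.1 h)
    subst this
    rw [PySem.Chars.count.go.eq_def]
    simp [pvOcc]
  | fuel+1, [], acc, _ => by
    rw [PySem.Chars.count.go.eq_def]
    simp [pvOcc]
  | fuel+1, x :: t, acc, h => by
    rw [PySem.Chars.count.go.eq_def]
    dsimp only
    by_cases hp : pvPat.isPrefixOf (x :: t)
    · rcases List.isPrefixOf_iff_prefix.1 hp with ⟨s, hs⟩
      simp only [pvPat, List.cons_append, List.nil_append] at hs
      injection hs.symm with h1 h2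
      subst h1; subst h2
      have hlen : s.length ≤ fuel := by simp at h; omega
      have IH := pvCountGo_eq fuel s (acc+1) hlen
      have h2 : pvPat.isPrefixOf ('A' :: 'S' :: s) = false := by simp [pvPat, List.isPrefixOf]
      have h3 : pvPat.isPrefixOf ('S' :: s) = false := by simp [pvPat, List.isPrefixOf]
      rw [if_pos hp]
      rw [show List.drop pvPat.length ('M'::'A'::'S'::s) = s from by simp [pvPat]]
      rw [IH]
      rw [pvOcc_cons, pvOcc_cons, pvOcc_cons]
      simp [hp, h2, h3]
      omega
    · have IH := pvCountGo_eq fuel t acc (by simpa using h)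
      rw [if_neg hp, IH, pvOcc_cons]
      have hpf : pvPat.isPrefixOf (x :: t) = false := by rw [← Bool.not_eq_true]; exact hp
      simp [hpf]

theorem pvCount_eq (l : List Char) : PySem.Chars.count l pvPat = (pvOcc l).length := by
  rw [PySem.Chars.count]
  rw [if_neg (by simp [pvPat])]
  simpa using pvCountGo_eq l.length l 0 le_rfl

theorem pvMem_of_occ {l : List Char} {p : Nat} (hlt : p < l.length) (hpre : pvPat <+: List.drop p l) :
    p ∈ pvOcc l := mem_pvOcc.2 ⟨hlt, hpre⟩

theorem pvPrefix_drop_drop {l : List Char} {k p : Nat} (hk : k ≤ p) :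
    (pvPat <+: List.drop (p - k) (List.drop k l)) ↔ pvPat <+: List.drop p l := by
  rw [List.drop_drop, Nat.add_sub_cancel' hk]

-- str.find(pat, k) returns the head of pvOccFrom l k
theorem pvFindFrom_head {l : List Char} {k p : Nat} {rest : List Nat}
    (h : pvOccFrom l k = p :: rest) :
    PySem.Chars.findFrom l pvPat (k : Int) none = (p : Int) := by
  have hpmem : p ∈ pvOccFrom l k := h ▸ List.mem_cons_self
  obtain ⟨hpo, hkp⟩ := mem_pvOccFrom.1 hpmem
  obtain ⟨hplt, hppre⟩ := mem_pvOcc.1 hpo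
  have hk : k ≤ l.length := le_of_lt (lt_of_le_of_lt hkp hplt)
  have hinf : pvPat <:+: List.drop k l := by
    refine List.IsInfix.trans (l₂ := List.drop (p - k) (List.drop k l)) ?_ ?_
    · exact ((pvPrefix_drop_drop hkp).2 hppre).isInfix
    · exact (List.drop_suffix _ _).isInfix
  have hne : PySem.Chars.find (List.drop k l) pvPat ≠ -1 :=
    (PySem.Chars.find_ne_neg_one_iff _ _).2 hinf
  have hge : 0 ≤ PySem.Chars.find (List.drop k l) pvPat := by
    have := PySem.Chars.neg_one_le_find (List.drop k l) pvPat
    omega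
  obtain ⟨hq1, hq2⟩ := PySem.Chars.find_spec hge
  set q := (PySem.Chars.find (List.drop k l) pvPat).toNat with hqdef
  have hqle : q ≤ p - k := by
    by_contra hc
    exact hq2 (p - k) (by omega) ((pvPrefix_drop_drop hkp).2 hppre)
  have hkq_pre : pvPat <+: List.drop (k + q) l := by
    rwa [List.drop_drop] at hq1
  have hkq_lt : k + q < l.length := by
    have := hkq_pre.length_le
    simp [pvPat] at this
    omega
  have hkq_mem : (k + q) ∈ pvOccFrom l k :=
    mem_pvOccFrom.2 ⟨pvMem_of_occ hkq_lt hkq_pre, Nat.le_add_right _ _⟩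
  have hple : p ≤ k + q := by
    rw [h] at hkq_mem
    rcases List.mem_cons.1 hkq_mem with heq | hmem
    · omega
    · have := List.rel_of_pairwise_cons (h ▸ pvOccFrom_pairwise l k) hmem
      omega
  have hpq : p = k + q := by omega
  rw [PySem.Chars.findFrom_natCast l pvPat k hk, if_neg hne]
  have : PySem.Chars.find (List.drop k l) pvPat = (q : Int) := by
    rw [hqdef]; exact (Int.toNat_of_nonneg hge).symm
  rw [this]
  omega

theorem pvOccFrom_tail {l : List Char} {k p : Nat} {rest : List Nat}
    (h : pvOccFrom l k = p :: rest) : pvOccFrom l (p + 1) = rest := by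
  have hpmem : p ∈ pvOccFrom l k := h ▸ List.mem_cons_self
  have hkp : k ≤ p := (mem_pvOccFrom.1 hpmem).2
  have h1 : pvOccFrom l (p+1) = (pvOccFrom l k).filter (fun x => decide (p+1 ≤ x)) := by
    unfold pvOccFrom
    rw [List.filter_filter]
    apply List.filter_congr
    intro x _
    by_cases hx : p + 1 ≤ x
    · have hkx : k ≤ x := by omega
      simp [hx, hkx]
    · simp [hx]
  rw [h1, h]
  rw [List.filter_cons_of_neg (by simp)]
  apply List.filter_eq_self.2
  intro a ha
  have := List.rel_of_pairwise_cons (h ▸ pvOccFrom_pairwise l k) ha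
  simp; omega

theorem pvFoldl_range_succ {α : Type} (f : α → α) (m : Nat) (i : α) :
    (List.range (m+1)).foldl (fun a (_ : Nat) => f a) i
      = (List.range m).foldl (fun a (_ : Nat) => f a) (f i) := by
  induction m generalizing i with
  | zero => simp
  | succ m ih =>
    conv_lhs => rw [List.range_succ]
    rw [List.foldl_append, ih i]
    conv_rhs => rw [List.range_succ]
    rw [List.foldl_append]
    simp

-- the count/find loop of A emits exactly the pvOccFrom positions, in order
theorem pvLoop_eq (line : List Char) (g : Int → (Int × Int)) :
    ∀ (m k : Nat) (acc : List (Int × Int)), (pvOccFrom line k).length = m →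
    ((List.range m).foldl (fun (st : List (Int × Int) × Int) (_ : Nat) =>
        (st.1 ++ [g (PySem.Chars.findFrom line pvPat (st.2 + 1) none)],
         PySem.Chars.findFrom line pvPat (st.2 + 1) none)) (acc, (k : Int) - 1)).1
    = acc ++ (pvOccFrom line k).map (fun (p : Nat) => g (p : Int)) := by
  intro m
  induction m with
  | zero =>
    intro k acc h
    rw [List.length_eq_zero_iff.1 h]
    simp
  | succ m ih =>
    intro k acc h
    obtain ⟨p, rest, hpr⟩ : ∃ p rest, pvOccFrom line k = p :: rest := by
      cases ho : pvOccFrom line k with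
      | nil => rw [ho] at h; simp at h
      | cons a b => exact ⟨a, b, rfl⟩
    rw [pvFoldl_range_succ]
    have hstep : ((acc, (k:Int) - 1).1 ++ [g (PySem.Chars.findFrom line pvPat ((acc, (k:Int) - 1).2 + 1) none)],
        PySem.Chars.findFrom line pvPat ((acc, (k:Int) - 1).2 + 1) none)
        = (acc ++ [g (p : Int)], ((p+1 : Nat) : Int) - 1) := by
      have hk1 : ((k:Int) - 1 + 1) = (k : Int) := by ring
      simp only [hk1, pvFindFrom_head hpr]
      simp only [Prod.mk.injEq]
      exact ⟨trivial, by push_cast; ring⟩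
    rw [hstep]
    rw [ih (p+1) (acc ++ [g (p : Int)]) (by rw [pvOccFrom_tail hpr]; have := hpr ▸ h; simpa using this)]
    rw [pvOccFrom_tail hpr, hpr]
    simp

theorem pvPerLine (line : List Char) (g : Int → (Int × Int)) (acc : List (Int × Int)) :
    ((List.range (PySem.Chars.count line ['M','A','S'])).foldl
      (fun (st : List (Int × Int) × Int) (_ : Nat) =>
        (st.1 ++ [g (PySem.Chars.findFrom line ['M','A','S'] (st.2 + 1) none)],
         PySem.Chars.findFrom line ['M','A','S'] (st.2 + 1) none)) (acc, (-1 : Int))).1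
    = acc ++ (pvOcc line).map (fun (p : Nat) => g (p : Int)) := by
  have h0 : ((0 : Nat) : Int) - 1 = (-1 : Int) := by norm_num
  have hc : PySem.Chars.count line pvPat = (pvOccFrom line 0).length := by
    rw [pvOccFrom_zero]; exact pvCount_eq line
  rw [← pvOccFrom_zero line, ← h0]
  exact pvLoop_eq line g _ 0 acc hc.symm

-- find_mas_lr as a flatMap over (line, start) pairs
theorem pvFindMasLr_false (lines : List (List Char)) (coord : List (Int × Int)) :
    pvFindMasLr lines coord false
      = (lines.zip coord).flatMap (fun lc =>
          (pvOcc lc.1).map (fun (p : Nat) => (lc.2.1 + (p:Int) + 1, lc.2.2 - (p:Int) - 1))) := by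
  unfold pvFindMasLr
  simp only [Bool.false_eq_true, if_false]
  have hstep : (fun (acc : List (Int × Int)) (lc : List Char × (Int × Int)) =>
      ((List.range (PySem.Chars.count lc.1 ['M','A','S'])).foldl
        (fun (st : List (Int × Int) × Int) (_ : Nat) =>
          (st.1 ++ [(lc.2.1 + PySem.Chars.findFrom lc.1 ['M','A','S'] (st.2 + 1) none + 1,
                     lc.2.2 - PySem.Chars.findFrom lc.1 ['M','A','S'] (st.2 + 1) none - 1)],
           PySem.Chars.findFrom lc.1 ['M','A','S'] (st.2 + 1) none)) (acc, (-1 : Int))).1)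
      = (fun acc lc => acc ++ (pvOcc lc.1).map (fun (p : Nat) => (lc.2.1 + (p:Int) + 1, lc.2.2 - (p:Int) - 1))) := by
    funext acc lc
    exact pvPerLine lc.1 (fun z => (lc.2.1 + z + 1, lc.2.2 - z - 1)) acc
  rw [hstep, PySem.List.foldl_append_eq_flatMap]
  simp

theorem pvFindMasLr_true (lines : List (List Char)) (coord : List (Int × Int)) :
    pvFindMasLr lines coord true
      = (lines.zip coord).flatMap (fun lc =>
          (pvOcc lc.1).map (fun (p : Nat) =>
            (lc.2.1 + (lc.1.length : Int) - (p:Int) - 2, lc.2.2 - (lc.1.length : Int) + (p:Int) + 2))) := by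
  unfold pvFindMasLr
  simp only [if_true]
  have hstep : (fun (acc : List (Int × Int)) (lc : List Char × (Int × Int)) =>
      ((List.range (PySem.Chars.count lc.1 ['M','A','S'])).foldl
        (fun (st : List (Int × Int) × Int) (_ : Nat) =>
          (st.1 ++ [(lc.2.1 + (lc.1.length : Int) - PySem.Chars.findFrom lc.1 ['M','A','S'] (st.2 + 1) none - 2,
                     lc.2.2 - (lc.1.length : Int) + PySem.Chars.findFrom lc.1 ['M','A','S'] (st.2 + 1) none + 2)],
           PySem.Chars.findFrom lc.1 ['M','A','S'] (st.2 + 1) none)) (acc, (-1 : Int))).1)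
      = (fun acc lc => acc ++ (pvOcc lc.1).map (fun (p : Nat) =>
          (lc.2.1 + (lc.1.length : Int) - (p:Int) - 2, lc.2.2 - (lc.1.length : Int) + (p:Int) + 2))) := by
    funext acc lc
    exact pvPerLine lc.1
      (fun z => (lc.2.1 + (lc.1.length : Int) - z - 2, lc.2.2 - (lc.1.length : Int) + z + 2)) acc
  rw [hstep, PySem.List.foldl_append_eq_flatMap]
  simp

-- B's scan with A's coordinate formula, forward
theorem pvScan_coord (cs : List ((Int × Int) × Char)) (sx sy : Int)
    (H : ∀ (j : Nat) (hj : j < cs.length), (cs[j]).1 = (sx + (j:Int), sy - (j:Int))) :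
    pvScanMas cs = (pvOcc (cs.map Prod.snd)).map (fun (p : Nat) => (sx + (p:Int) + 1, sy - (p:Int) - 1)) := by
  rw [pvScanMas_eq]
  apply List.map_congr_left
  intro p hp
  have h3 := pvOcc_add3 hp
  rw [List.length_map] at h3
  have hj : p + 1 < cs.length := by omega
  rw [List.getD_eq_getElem _ _ hj, H (p+1) hj]
  simp only [Prod.mk.injEq]
  constructor <;> push_cast <;> ring

-- B's scan on the reversed diagonal with A's reversed-pass coordinate formula
theorem pvScan_coord_rev (cs : List ((Int × Int) × Char)) (sx sy : Int)
    (H : ∀ (j : Nat) (hj : j < cs.length), (cs[j]).1 = (sx + (j:Int), sy - (j:Int))) :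
    pvScanMas cs.reverse = (pvOcc ((cs.map Prod.snd).reverse)).map (fun (p : Nat) =>
      (sx + (cs.length : Int) - (p:Int) - 2, sy - (cs.length : Int) + (p:Int) + 2)) := by
  rw [pvScanMas_eq]
  rw [show cs.reverse.map Prod.snd = (cs.map Prod.snd).reverse from by simp]
  apply List.map_congr_left
  intro p hp
  have h3 := pvOcc_add3 hp
  rw [List.length_reverse, List.length_map] at h3
  have hj : p + 1 < cs.reverse.length := by simp; omega
  rw [List.getD_eq_getElem _ _ hj, List.getElem_reverse]
  have hj2 : cs.length - 1 - (p+1) < cs.length := by simp at hj; omega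
  rw [H (cs.length - 1 - (p+1)) hj2]
  simp only [Prod.mk.injEq]
  constructor <;> omega

theorem pvH1 (rows : List (List Char)) (c : Nat) :
    ∀ (j : Nat) (hj : j < (((List.range (c+1)).map
        (fun (i : Nat) => (((i:Int), ((c - i : Nat):Int)), (rows.getD i []).getD (c - i) ' '))).length)),
      ((((List.range (c+1)).map
        (fun (i : Nat) => (((i:Int), ((c - i : Nat):Int)), (rows.getD i []).getD (c - i) ' ')))[j]).1)
        = ((0:Int) + (j:Int), (c:Int) - (j:Int)) := by
  intro j hj
  simp only [List.length_map, List.length_range] at hj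
  simp only [List.getElem_map, List.getElem_range]
  simp only [Prod.mk.injEq]
  constructor <;> omega

theorem pvE1 (rows : List (List Char)) (c : Nat) :
    (pvOcc ((List.range (c+1)).map (fun i => (rows.getD i []).getD (c - i) ' '))).map
        (fun (p : Nat) => ((0:Int) + (p:Int) + 1, (c:Int) - (p:Int) - 1))
      = pvScanMas ((List.range (c+1)).map
          (fun (i : Nat) => (((i:Int), ((c - i : Nat):Int)), (rows.getD i []).getD (c - i) ' '))) := by
  have h := pvScan_coord _ (0:Int) (c:Int) (pvH1 rows c)
  rw [show ((List.range (c+1)).map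
      (fun (i : Nat) => (((i:Int), ((c - i : Nat):Int)), (rows.getD i []).getD (c - i) ' '))).map Prod.snd
      = (List.range (c+1)).map (fun i => (rows.getD i []).getD (c - i) ' ') from by
    simp [List.map_map]] at h
  exact h.symm

theorem pvE1r (rows : List (List Char)) (c : Nat) :
    (pvOcc (((List.range (c+1)).map (fun i => (rows.getD i []).getD (c - i) ' ')).reverse)).map
        (fun (p : Nat) => ((0:Int) + ((c+1 : Nat):Int) - (p:Int) - 2, (c:Int) - ((c+1 : Nat):Int) + (p:Int) + 2))
      = pvScanMas ((List.range (c+1)).map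
          (fun (i : Nat) => (((i:Int), ((c - i : Nat):Int)), (rows.getD i []).getD (c - i) ' '))).reverse := by
  have h := pvScan_coord_rev _ (0:Int) (c:Int) (pvH1 rows c)
  rw [show ((List.range (c+1)).map
      (fun (i : Nat) => (((i:Int), ((c - i : Nat):Int)), (rows.getD i []).getD (c - i) ' '))).map Prod.snd
      = (List.range (c+1)).map (fun i => (rows.getD i []).getD (c - i) ' ') from by
    simp [List.map_map]] at h
  rw [show ((List.range (c+1)).map
      (fun (i : Nat) => (((i:Int), ((c - i : Nat):Int)), (rows.getD i []).getD (c - i) ' '))).length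
      = c + 1 from by simp] at h
  exact h.symm

theorem pvH2 (rows : List (List Char)) (n r : Nat) :
    ∀ (j : Nat) (hj : j < (((List.range (n-r)).map
        (fun (i : Nat) => ((((r + i : Nat):Int), ((n - i - 1 : Nat):Int)), (rows.getD (r+i) []).getD (n - i - 1) ' '))).length)),
      ((((List.range (n-r)).map
        (fun (i : Nat) => ((((r + i : Nat):Int), ((n - i - 1 : Nat):Int)), (rows.getD (r+i) []).getD (n - i - 1) ' ')))[j]).1)
        = (((n:Int) - ((n:Int) - (r:Int) - 1) - 1) + (j:Int), ((r:Int) + ((n:Int) - (r:Int) - 1)) - (j:Int)) := by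
  intro j hj
  simp only [List.length_map, List.length_range] at hj
  simp only [List.getElem_map, List.getElem_range]
  simp only [Prod.mk.injEq]
  constructor <;> omega

theorem pvE2 (rows : List (List Char)) (n r : Nat) :
    (pvOcc ((List.range (n-r)).map (fun i => (rows.getD (r+i) []).getD (n - i - 1) ' '))).map
        (fun (p : Nat) => ((n:Int) - ((n:Int) - (r:Int) - 1) - 1 + (p:Int) + 1,
                           (r:Int) + ((n:Int) - (r:Int) - 1) - (p:Int) - 1))
      = pvScanMas ((List.range (n-r)).map
          (fun (i : Nat) => ((((r + i : Nat):Int), ((n - i - 1 : Nat):Int)), (rows.getD (r+i) []).getD (n - i - 1) ' '))) := by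
  have h := pvScan_coord _ ((n:Int) - ((n:Int) - (r:Int) - 1) - 1) ((r:Int) + ((n:Int) - (r:Int) - 1)) (pvH2 rows n r)
  rw [show ((List.range (n-r)).map
      (fun (i : Nat) => ((((r + i : Nat):Int), ((n - i - 1 : Nat):Int)), (rows.getD (r+i) []).getD (n - i - 1) ' '))).map Prod.snd
      = (List.range (n-r)).map (fun i => (rows.getD (r+i) []).getD (n - i - 1) ' ') from by
    simp [List.map_map]] at h
  exact h.symm

theorem pvE2r (rows : List (List Char)) (n r : Nat) :
    (pvOcc (((List.range (n-r)).map (fun i => (rows.getD (r+i) []).getD (n - i - 1) ' ')).reverse)).map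
        (fun (p : Nat) => ((n:Int) - ((n:Int) - (r:Int) - 1) - 1 + ((n - r : Nat):Int) - (p:Int) - 2,
                           (r:Int) + ((n:Int) - (r:Int) - 1) - ((n - r : Nat):Int) + (p:Int) + 2))
      = pvScanMas ((List.range (n-r)).map
          (fun (i : Nat) => ((((r + i : Nat):Int), ((n - i - 1 : Nat):Int)), (rows.getD (r+i) []).getD (n - i - 1) ' '))).reverse := by
  have h := pvScan_coord_rev _ ((n:Int) - ((n:Int) - (r:Int) - 1) - 1) ((r:Int) + ((n:Int) - (r:Int) - 1)) (pvH2 rows n r)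
  rw [show ((List.range (n-r)).map
      (fun (i : Nat) => ((((r + i : Nat):Int), ((n - i - 1 : Nat):Int)), (rows.getD (r+i) []).getD (n - i - 1) ' '))).map Prod.snd
      = (List.range (n-r)).map (fun i => (rows.getD (r+i) []).getD (n - i - 1) ' ') from by
    simp [List.map_map]] at h
  rw [show ((List.range (n-r)).map
      (fun (i : Nat) => ((((r + i : Nat):Int), ((n - i - 1 : Nat):Int)), (rows.getD (r+i) []).getD (n - i - 1) ' '))).length
      = n - r from by simp] at h
  exact h.symm

theorem main_eq (input : List String) : find_mas_diag_rl input = find_mas_diag_rl_alt input := by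
  simp only [find_mas_diag_rl, find_mas_diag_rl_alt]
  rw [PySem.List.foldl_prod_mk (fun (s : List (List Char)) c =>
        s ++ [List.foldl (fun l i => l ++ [((List.map String.toList input).getD i []).getD (c - i) ' ']) []
          (List.range (c + 1))])
      (fun (s : List (Int × Int)) (c : Nat) => s ++ [((0:Int), (c:Int))])]
  rw [PySem.List.foldl_prod_mk (fun (s : List (List Char)) r =>
        s ++ [List.foldl (fun l i =>
            l ++ [((List.map String.toList input).getD (r + i) []).getD (input.length - i - 1) ' ']) []
          (List.range (input.length - r))])
      (fun (s : List (Int × Int)) (r : Nat) =>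
        s ++ [((input.length : Int) - ((input.length : Int) - (r:Int) - 1) - 1,
               (r : Int) + ((input.length : Int) - (r:Int) - 1))])]
  simp only [PySem.List.foldl_append_singleton_eq_map, List.nil_append]
  rw [pvFindMasLr_false, pvFindMasLr_true]
  simp only [List.map_append, List.map_map]
  rw [List.zip_append (by simp), List.zip_append (by simp)]
  simp only [List.zip_map', List.flatMap_append, List.flatMap_map]
  simp only [PySem.List.foldl_append_eq_flatMap, List.nil_append, List.flatMap_append, List.flatMap_map]
  simp only [Function.comp_def, List.length_reverse, List.length_map, List.length_range, List.map_map]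
  refine congrArg₂ (· ++ ·) (congrArg₂ (· ++ ·) ?_ ?_) (congrArg₂ (· ++ ·) ?_ ?_)
  · exact congrArg (fun f => List.flatMap f (List.range input.length))
      (funext fun c => pvE1 (List.map String.toList input) c)
  · exact congrArg (fun f => List.flatMap f (List.drop 1 (List.range input.length)))
      (funext fun r => pvE2 (List.map String.toList input) input.length r)
  · exact congrArg (fun f => List.flatMap f (List.range input.length))
      (funext fun c => pvE1r (List.map String.toList input) c)
  · exact congrArg (fun f => List.flatMap f (List.drop 1 (List.range input.length)))
      (funext fun r => pvE2r (List.map String.toList input) input.length r)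

-- ===== VERDICT (by name: the statement is the Claim_ definition above) =====
theorem find_mas_diag_rl_spec : Claim_equal_find_mas_diag_rl := by
  intro input _ _
  unfold Spec_find_mas_diag_rl
  exact main_eq input
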